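-- pv_equiv track=rewrite | github.com/reivajlow/website | model/ingreso.py | recortar_nombre_pais
-- ===== SOURCE A (Python) =====
-- def recortar_nombre_pais(pais):
--     pais = pais.lower()
--     vocales = ('a', 'e', 'i', 'o', 'u')
--     for letra in vocales:
--         pais = pais.replace(letra, "")
--     if len(pais) > 3:
--         pais = pais[0:3]
--     return pais
-- ===== SOURCE B (Python) =====
-- def recortar_nombre_pais(pais):
--     vocales = {'a', 'e', 'i', 'o', 'u'}
--     return ''.join(c for c in pais.lower() if c not in vocales)[:3]
-- ===== Notes on version B (the rewrite author's own statement) =====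
-- stated objective: idiomatic
-- what changed: Replaces five sequential full-string .replace scans (one per vowel) and a conditional manual truncation with a single character-level pass filtering non-vowels via a set, then an unconditional [:3] slice.
import Mathlib
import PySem

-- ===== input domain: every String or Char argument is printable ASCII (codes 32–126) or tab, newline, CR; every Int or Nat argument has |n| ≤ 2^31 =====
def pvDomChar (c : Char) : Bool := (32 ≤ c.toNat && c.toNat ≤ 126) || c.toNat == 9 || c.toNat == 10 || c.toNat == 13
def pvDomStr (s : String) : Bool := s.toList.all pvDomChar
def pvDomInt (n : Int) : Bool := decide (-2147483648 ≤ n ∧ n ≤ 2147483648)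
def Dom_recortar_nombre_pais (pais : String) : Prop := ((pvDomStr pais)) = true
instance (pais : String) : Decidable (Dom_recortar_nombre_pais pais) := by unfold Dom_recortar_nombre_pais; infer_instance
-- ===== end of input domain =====

-- B replaces A's five sequential full-string replace scans and conditional manual
-- truncation with one character-level pass filtering non-vowels, then a [:3] slice
-- (objective: idiomatic); same return value on every input.

-- ===== PORT A =====
def recortar_nombre_pais (pais : String) : String :=
  let pais := PySem.Str.lower pais
  let vocales : List String := ["a", "e", "i", "o", "u"]
  let pais := vocales.foldl (fun p letra => PySem.Str.replace p letra "") pais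
  if PySem.Str.len pais > 3 then PySem.Str.slice pais (some 0) (some 3) else pais

-- ===== PORT B =====
def recortar_nombre_pais_alt (pais : String) : String :=
  let vocales : PySem.Set Char := PySem.Set.ofList ['a', 'e', 'i', 'o', 'u']
  String.ofList (((PySem.Str.lower pais).toList.filter (fun c => !(vocales.contains c))).take 3)

-- ===== PRECONDITION & SPEC =====
def Spec_recortar_nombre_pais (pais : String) (out : String) : Prop := out = recortar_nombre_pais_alt pais
instance (pais : String) (out : String) : Decidable (Spec_recortar_nombre_pais pais out) := by unfold Spec_recortar_nombre_pais; infer_instance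

-- ===== CLAIM (what is proved, stated in full; the proofs are below) =====
def Claim_equal_recortar_nombre_pais : Prop := ∀ (pais : String), Dom_recortar_nombre_pais pais → Spec_recortar_nombre_pais pais (recortar_nombre_pais pais)

-- ===== LEMMAS AND PROOFS =====

-- replace.go with a single-char pattern and empty replacement is a filter
theorem go_single (c : Char) (fuel : Nat) : ∀ (l acc : List Char), l.length ≤ fuel →
    PySem.Chars.replace.go [c] [] fuel l acc = acc.reverse ++ l.filter (fun x => x != c) := by
  induction fuel with
  | zero => intro l acc h; simp at h; subst h; simp [PySem.Chars.replace.go]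
  | succ n ih =>
    intro l acc h
    cases l with
    | nil => simp [PySem.Chars.replace.go]
    | cons x t =>
      simp only [PySem.Chars.replace.go, List.isPrefixOf]
      by_cases hx : x = c
      · subst hx
        simp only [beq_self_eq_true, Bool.true_and, if_pos]
        show PySem.Chars.replace.go [x] [] n t acc = _
        rw [ih t acc (by simpa using Nat.le_of_succ_le_succ h)]
        simp
      · have hb : (c == x) = false := by simp [beq_eq_false_iff_ne]; exact fun hh => absurd hh.symm hx
        simp only [hb, Bool.false_and, Bool.false_eq_true, if_false]
        rw [ih t (x :: acc) (by simpa using Nat.le_of_succ_le_succ h)]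
        simp [hx]

theorem replace_single (c : Char) (s : List Char) :
    PySem.Chars.replace s [c] [] = s.filter (fun x => x != c) := by
  rw [PySem.Chars.replace]
  simp only [List.isEmpty]
  exact go_single c s.length s [] (le_refl _)

-- the conjunction of the five per-vowel tests is the negated set-membership test
theorem vowel_pred (c : Char) :
    ((c != 'u') && ((c != 'o') && ((c != 'i') && ((c != 'e') && (c != 'a')))))
    = !((PySem.Set.ofList ['a','e','i','o','u']).contains c) := by
  have h : (PySem.Set.ofList ['a','e','i','o','u'] : List Char) = ['a','e','i','o','u'] := by decide
  rw [h, Bool.eq_iff_iff]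
  simp [PySem.Set.contains, bne]
  tauto

-- A's five chained replaces compute B's single filter
theorem fold_replace_eq_filter (p : String) :
    (PySem.Str.replace (PySem.Str.replace (PySem.Str.replace (PySem.Str.replace (PySem.Str.replace p "a" "") "e" "") "i" "") "o" "") "u" "").toList
    = p.toList.filter (fun c => !((PySem.Set.ofList ['a','e','i','o','u']).contains c)) := by
  simp only [PySem.Str.toList_replace, String.toList_empty]
  rw [show ("a" : String).toList = ['a'] from rfl, show ("e" : String).toList = ['e'] from rfl,
      show ("i" : String).toList = ['i'] from rfl, show ("o" : String).toList = ['o'] from rfl,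
      show ("u" : String).toList = ['u'] from rfl]
  rw [replace_single, replace_single, replace_single, replace_single, replace_single]
  simp only [List.filter_filter]
  exact List.filter_congr (fun c _ => vowel_pred c)

-- A's conditional truncation is an unconditional take 3
theorem trunc_eq (q : String) :
    (if PySem.Str.len q > 3 then PySem.Str.slice q (some 0) (some 3) else q)
    = String.ofList (q.toList.take 3) := by
  rw [PySem.Str.len_eq]
  split_ifs with hlen
  · rw [← String.ofList_toList (s := PySem.Str.slice q (some 0) (some 3))]
    congr 1
    rw [PySem.Str.toList_slice]
    simp [PySem.Chars.slice_eq_listSlice, PySem.List.slice_to]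
  · rw [List.take_of_length_le (by exact_mod_cast not_lt.mp hlen), String.ofList_toList]

-- ===== VERDICT (by name: the statement is the Claim_ definition above) =====
theorem recortar_nombre_pais_spec : Claim_equal_recortar_nombre_pais := by
  intro pais _
  unfold Spec_recortar_nombre_pais recortar_nombre_pais recortar_nombre_pais_alt
  simp only [List.foldl]
  rw [trunc_eq, fold_replace_eq_filter]
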